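-- pv_equiv track=rewrite | github.com/diablo-101/PermuSub | permuSub.py | generate_subdomain_permutations
-- ===== SOURCE A (Python) =====
-- import itertools
--
-- def generate_subdomain_permutations(base_subdomain, words):
--     permutations = []
--     subdomain_parts = base_subdomain.split('.')
--     for i in range(len(subdomain_parts) + 1):
--         for combo in itertools.permutations(words, i):
--             new_subdomain = '.'.join(combo) + '.' + '.'.join(subdomain_parts)
--             permutations.append(new_subdomain)
--     return permutations
-- ===== SOURCE B (Python) =====
-- def generate_subdomain_permutations(base_subdomain, words):
--     # Incremental frontier builder: instead of calling itertools.permutations per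
--     # length, extend partial permutations one word at a time, emitting as we go.
--     parts = base_subdomain.split('.')
--     suffix = '.' + '.'.join(parts)
--     out = [suffix]                       # the empty permutation
--     frontier = [('', list(words))]       # (joined prefix, words not yet used)
--     for depth in range(len(parts)):
--         build = depth + 1 < len(parts)   # the last frontier would never be used
--         nxt = []
--         for pre, rem in frontier:
--             for k in range(len(rem)):
--                 w = rem[k]
--                 npre = w if depth == 0 else pre + '.' + w
--                 out.append(npre + suffix)
--                 if build:
--                     nxt.append((npre, rem[:k] + rem[k+1:]))
--         frontier = nxt
--     return out
-- ===== Notes on version B (the rewrite author's own statement) =====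
-- stated objective: alternative
-- what changed: Replaced the per-length itertools.permutations calls with an incremental frontier of partial permutations (prefix string, unused words) that is extended one word at a time, emitting each subdomain as the prefix is built.
import Mathlib
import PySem

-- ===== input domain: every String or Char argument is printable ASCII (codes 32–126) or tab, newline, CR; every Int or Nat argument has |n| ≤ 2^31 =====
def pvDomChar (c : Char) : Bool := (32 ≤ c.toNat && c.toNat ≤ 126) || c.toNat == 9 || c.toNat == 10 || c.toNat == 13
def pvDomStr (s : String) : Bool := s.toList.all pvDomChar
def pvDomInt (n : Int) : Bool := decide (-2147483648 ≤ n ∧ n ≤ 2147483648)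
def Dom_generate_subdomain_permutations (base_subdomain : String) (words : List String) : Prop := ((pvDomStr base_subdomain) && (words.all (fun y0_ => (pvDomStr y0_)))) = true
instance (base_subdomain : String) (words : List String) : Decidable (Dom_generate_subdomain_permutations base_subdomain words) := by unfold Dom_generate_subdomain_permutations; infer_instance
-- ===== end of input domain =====

-- B replaces A's per-length itertools.permutations calls with an incremental frontier of
-- partial permutations extended one word at a time (objective: alternative decomposition).

-- ===== PORT A =====
-- itertools.permutations(words, i) is PySem.List.permutations words i (index-lexicographic order, exact).
-- '.'.split / '.'.join via PySem.Str; split? with the non-empty separator "." always returns some.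
def generate_subdomain_permutations (base_subdomain : String) (words : List String) : List String :=
  let subdomain_parts := (PySem.Str.split? base_subdomain ".").getD []
  (List.range (subdomain_parts.length + 1)).foldl (fun permutations i =>
    (PySem.List.permutations words i).foldl (fun permutations combo =>
      permutations ++ [PySem.Str.join "." combo ++ "." ++ PySem.Str.join "." subdomain_parts]) permutations) []

-- ===== PORT B =====
-- inner loop of Source B: 'for k in range(len(rem))'; rem[k] with 0 ≤ k < len(rem) is rem.getD k ""
-- (exact, index in range) and rem[:k] + rem[k+1:] is rem.eraseIdx k (exact for 0 ≤ k < len(rem)).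
def pvExt (suffix : String) (depth : Nat) (build : Bool)
    (st : List String × List (String × List String))
    (pr : String × List String) : List String × List (String × List String) :=
  (List.range pr.2.length).foldl (fun st3 k =>
    let w := pr.2.getD k ""
    let npre := if depth == 0 then w else pr.1 ++ "." ++ w
    (st3.1 ++ [npre ++ suffix],
     st3.2 ++ (if build then [(npre, pr.2.eraseIdx k)] else []))) st

-- one iteration of Source B's 'for depth in range(len(parts))' loop (n = len(parts)):
-- fold the frontier, restart nxt at []; 'build = depth + 1 < len(parts)'
def pvStep (suffix : String) (n : Nat) (st : List String × List (String × List String))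
    (depth : Nat) : List String × List (String × List String) :=
  st.2.foldl (pvExt suffix depth (decide (depth + 1 < n))) (st.1, [])

def generate_subdomain_permutations_alt (base_subdomain : String) (words : List String) : List String :=
  let parts := (PySem.Str.split? base_subdomain ".").getD []
  let suffix := "." ++ PySem.Str.join "." parts
  ((List.range parts.length).foldl (pvStep suffix parts.length) ([suffix], [("", words)])).1

-- ===== PRECONDITION & SPEC =====
def Spec_generate_subdomain_permutations (base_subdomain : String) (words : List String) (out : List String) : Prop := out = generate_subdomain_permutations_alt base_subdomain words
instance (base_subdomain : String) (words : List String) (out : List String) : Decidable (Spec_generate_subdomain_permutations base_subdomain words out) := by unfold Spec_generate_subdomain_permutations; infer_instance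

-- ===== CLAIM (what is proved, stated in full; the proofs are below) =====
def Claim_equal_generate_subdomain_permutations : Prop := ∀ (base_subdomain : String) (words : List String), Dom_generate_subdomain_permutations base_subdomain words → Spec_generate_subdomain_permutations base_subdomain words (generate_subdomain_permutations base_subdomain words)

-- ===== LEMMAS AND PROOFS =====

-- pairs (chosen prefix, remaining words) of a partial permutation, in itertools order
def pvPermsP : Nat → List String → List (List String × List String)
  | 0, xs => [([], xs)]
  | r+1, xs => (List.range xs.length).flatMap (fun i =>
      (pvPermsP r (xs.eraseIdx i)).map (fun p => (xs.getD i "" :: p.1, p.2)))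

-- extend every partial permutation by every still-unused word (B's frontier step, on pairs)
def pvStepP (l : List (List String × List String)) : List (List String × List String) :=
  l.flatMap (fun p => (List.range p.2.length).map (fun k => (p.1 ++ [p.2.getD k ""], p.2.eraseIdx k)))

theorem pvPermsP_succ (r : Nat) (xs : List String) :
    pvPermsP (r+1) xs = (List.range xs.length).flatMap (fun i =>
      (pvPermsP r (xs.eraseIdx i)).map (fun p => (xs.getD i "" :: p.1, p.2))) := rfl

theorem pvPermsP_fst (r : Nat) : ∀ xs : List String,
    (pvPermsP r xs).map Prod.fst = PySem.List.permutations xs r := by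
  induction r with
  | zero => intro xs; rw [PySem.List.permutations]; simp [pvPermsP]
  | succ r ih =>
    intro xs
    rw [PySem.List.permutations]
    rw [pvPermsP_succ]
    simp only [List.map_flatMap]
    refine List.flatMap_congr (fun i hi => ?_)
    have hlt : i < xs.length := by simpa using List.mem_range.mp hi
    have : xs[i]? = some (xs.getD i "") := by
      rw [List.getElem?_eq_getElem hlt, List.getD_eq_getElem xs _ hlt]
    rw [this]
    simp [List.map_map, ← ih]

theorem pvPermsP_len (r : Nat) : ∀ (xs : List String) (p : List String × List String),
    p ∈ pvPermsP r xs → p.1.length = r := by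
  induction r with
  | zero => intro xs p hp; simp [pvPermsP] at hp; simp [hp]
  | succ r ih =>
    intro xs p hp
    simp only [pvPermsP, List.mem_flatMap, List.mem_map] at hp
    obtain ⟨i, _, q, hq, rfl⟩ := hp
    simp [ih _ _ hq]

theorem pvStepP_map_cons (x : String) (l : List (List String × List String)) :
    pvStepP (l.map (fun p => (x :: p.1, p.2))) = (pvStepP l).map (fun p => (x :: p.1, p.2)) := by
  simp [pvStepP, List.flatMap_map, List.map_flatMap, List.map_map, Function.comp_def]

theorem pvPermsP_step (r : Nat) : ∀ xs : List String,
    pvPermsP (r+1) xs = pvStepP (pvPermsP r xs) := by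
  induction r with
  | zero =>
    intro xs
    simp [pvPermsP, pvStepP, ← List.map_eq_flatMap]
  | succ r ih =>
    intro xs
    calc pvPermsP (r+2) xs
        = (List.range xs.length).flatMap (fun i =>
            (pvStepP (pvPermsP r (xs.eraseIdx i))).map (fun p => (xs.getD i "" :: p.1, p.2))) := by
          rw [pvPermsP_succ (r+1) xs]
          exact List.flatMap_congr (fun i _ => by rw [ih])
      _ = (List.range xs.length).flatMap (fun i =>
            pvStepP ((pvPermsP r (xs.eraseIdx i)).map (fun p => (xs.getD i "" :: p.1, p.2)))) := by
          exact List.flatMap_congr (fun i _ => (pvStepP_map_cons _ _).symm)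
      _ = pvStepP (pvPermsP (r+1) xs) := by
          rw [pvPermsP_succ r xs]
          simp only [pvStepP, List.flatMap_assoc]

-- join "." over a non-empty snoc (chars level, then strings)
theorem pv_chars_join_snoc (sep w a : List Char) : ∀ c : List (List Char),
    PySem.Chars.join sep ((a :: c) ++ [w]) = PySem.Chars.join sep (a :: c) ++ sep ++ w := by
  intro c
  induction c generalizing a with
  | nil => simp [PySem.Chars.join_cons_cons, PySem.Chars.join_singleton]
  | cons b c ih =>
    have h1 : (a :: b :: c) ++ [w] = a :: ((b :: c) ++ [w]) := by simp
    rw [h1]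
    have h2 : a :: ((b :: c) ++ [w]) = a :: (b :: (c ++ [w])) := by simp
    rw [h2, PySem.Chars.join_cons_cons]
    have := ih b
    simp only [List.cons_append] at this
    rw [this, PySem.Chars.join_cons_cons]
    simp [List.append_assoc]

theorem pv_str_join_snoc (w : String) (c : List String) (hc : c ≠ []) :
    PySem.Str.join "." (c ++ [w]) = PySem.Str.join "." c ++ "." ++ w := by
  cases c with
  | nil => exact absurd rfl hc
  | cons a c =>
    simp only [PySem.Str.join, List.map_append, List.map_cons, List.map_nil]
    rw [pv_chars_join_snoc]
    rw [String.ofList_append, String.ofList_append, String.ofList_toList,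
      String.ofList_toList]

theorem pv_str_join_single (w : String) : PySem.Str.join "." [w] = w := by
  simp [PySem.Str.join, PySem.Chars.join, List.intercalate]

-- evaluate one pvExt call on a frontier entry coming from a partial permutation
theorem pvExt_eval (s : String) (d : Nat) (b : Bool) (out : List String)
    (nxt : List (String × List String)) (c rem : List String) (hc : c.length = d) :
    pvExt s d b (out, nxt) (PySem.Str.join "." c, rem)
    = (out ++ (List.range rem.length).map
          (fun k => PySem.Str.join "." (c ++ [rem.getD k ""]) ++ s),
       nxt ++ (if b then (List.range rem.length).map
          (fun k => (PySem.Str.join "." (c ++ [rem.getD k ""]), rem.eraseIdx k)) else [])) := by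
  have hnpre : ∀ k : Nat,
      (if d == 0 then rem.getD k "" else PySem.Str.join "." c ++ "." ++ rem.getD k "")
      = PySem.Str.join "." (c ++ [rem.getD k ""]) := by
    intro k
    cases d with
    | zero =>
      have : c = [] := List.length_eq_zero_iff.mp hc
      simp [this, pv_str_join_single]
    | succ d =>
      have hne : c ≠ [] := by
        intro h; rw [h] at hc; simp at hc
      simp [pv_str_join_snoc _ _ hne]
  have hbody : ∀ (st3 : List String × List (String × List String)) (k : Nat),
      (let w := rem.getD k "";
       let npre := if d == 0 then w else PySem.Str.join "." c ++ "." ++ w;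
       (st3.1 ++ [npre ++ s], st3.2 ++ (if b then [(npre, rem.eraseIdx k)] else [])))
      = (st3.1 ++ [PySem.Str.join "." (c ++ [rem.getD k ""]) ++ s],
         st3.2 ++ (if b then [(PySem.Str.join "." (c ++ [rem.getD k ""]), rem.eraseIdx k)]
                   else [])) := by
    intro st3 k
    simp only [hnpre k]
  show (List.range rem.length).foldl _ (out, nxt) = _
  calc (List.range rem.length).foldl (fun st3 k =>
          (let w := rem.getD k "";
           let npre := if d == 0 then w else PySem.Str.join "." c ++ "." ++ w;
           (st3.1 ++ [npre ++ s], st3.2 ++ (if b then [(npre, rem.eraseIdx k)] else []))))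
          (out, nxt)
      = (List.range rem.length).foldl (fun st3 k =>
          (st3.1 ++ [PySem.Str.join "." (c ++ [rem.getD k ""]) ++ s],
           st3.2 ++ (if b then [(PySem.Str.join "." (c ++ [rem.getD k ""]), rem.eraseIdx k)]
                     else []))) (out, nxt) := by
        exact PySem.List.foldl_congr_mem _ _ _ _ (fun st3 k _ => hbody st3 k)
    _ = ((List.range rem.length).foldl (fun a k =>
            a ++ [PySem.Str.join "." (c ++ [rem.getD k ""]) ++ s]) out,
         (List.range rem.length).foldl (fun nx k =>
            nx ++ (if b then [(PySem.Str.join "." (c ++ [rem.getD k ""]), rem.eraseIdx k)]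
                   else [])) nxt) :=
        PySem.List.foldl_prod_mk
          (fun a k => a ++ [PySem.Str.join "." (c ++ [rem.getD k ""]) ++ s])
          (fun nx k => nx ++ (if b then [(PySem.Str.join "." (c ++ [rem.getD k ""]),
            rem.eraseIdx k)] else []))
          (List.range rem.length) out nxt
    _ = _ := by
        rw [PySem.List.foldl_append_singleton_eq_map, PySem.List.foldl_append_eq_flatMap]
        cases b with
        | true => simp [← List.map_eq_flatMap]
        | false => simp

-- folding pvExt over a frontier built from partial permutations = one pvStepP step
theorem pv_frontier_fold (s : String) (d : Nat) (b : Bool) :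
    ∀ (P : List (List String × List String)), (∀ p ∈ P, p.1.length = d) →
    ∀ (out : List String) (nxt : List (String × List String)),
    (P.map (fun p => (PySem.Str.join "." p.1, p.2))).foldl (pvExt s d b) (out, nxt)
    = (out ++ (pvStepP P).map (fun p => PySem.Str.join "." p.1 ++ s),
       nxt ++ (if b then (pvStepP P).map (fun p => (PySem.Str.join "." p.1, p.2)) else [])) := by
  intro P
  induction P with
  | nil => intro _ out nxt; cases b <;> simp [pvStepP]
  | cons p P ih =>
    intro hlen out nxt
    simp only [List.map_cons, List.foldl_cons]
    rw [pvExt_eval s d b out nxt p.1 p.2 (hlen p (by simp))]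
    rw [ih (fun q hq => hlen q (by simp [hq])) _ _]
    have hstep : pvStepP (p :: P)
        = (List.range p.2.length).map
            (fun k => (p.1 ++ [p.2.getD k ""], p.2.eraseIdx k)) ++ pvStepP P := by
      simp [pvStepP]
    rw [hstep]
    cases b <;> simp [List.map_append, List.map_map, List.append_assoc, Function.comp]

-- one iteration of B's depth loop, in terms of pvPermsP
theorem pvStep_eval (s : String) (words : List String) (n d : Nat) (out : List String) :
    pvStep s n (out, (pvPermsP d words).map (fun p => (PySem.Str.join "." p.1, p.2))) d
    = (out ++ (pvPermsP (d+1) words).map (fun p => PySem.Str.join "." p.1 ++ s),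
       if d + 1 < n then (pvPermsP (d+1) words).map (fun p => (PySem.Str.join "." p.1, p.2))
       else []) := by
  show ((pvPermsP d words).map (fun p => (PySem.Str.join "." p.1, p.2))).foldl
      (pvExt s d (decide (d + 1 < n))) (out, []) = _
  rw [pv_frontier_fold s d (decide (d + 1 < n)) (pvPermsP d words)
      (fun p hp => pvPermsP_len d words p hp) out []]
  rw [pvPermsP_step]
  by_cases h : d + 1 < n <;> simp [h]

-- B's whole outer loop vs the flatMap form of A's output: invariant over the first m depths
theorem pv_main (s : String) (words : List String) (n : Nat) : ∀ m : Nat, m ≤ n →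
    ((List.range m).foldl (pvStep s n) ([s], [("", words)])).1
      = (List.range (m+1)).flatMap
          (fun i => (PySem.List.permutations words i).map (fun c => PySem.Str.join "." c ++ s))
    ∧ (m < n → ((List.range m).foldl (pvStep s n) ([s], [("", words)])).2
        = (pvPermsP m words).map (fun p => (PySem.Str.join "." p.1, p.2))) := by
  intro m
  induction m with
  | zero =>
    intro _
    have h0 : PySem.List.permutations words 0 = [[]] := by rw [PySem.List.permutations]
    constructor
    · simp [h0, show PySem.Str.join "." ([] : List String) = "" from rfl, String.empty_append]
    · intro _
      simp [pvPermsP, show PySem.Str.join "." ([] : List String) = "" from rfl]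
  | succ m ih =>
    intro hmn
    have hm : m < n := Nat.lt_of_succ_le hmn
    obtain ⟨ih1, ih2⟩ := ih (Nat.le_of_lt hm)
    have hfold : (List.range (m+1)).foldl (pvStep s n) ([s], [("", words)])
        = pvStep s n ((List.range m).foldl (pvStep s n) ([s], [("", words)])) m := by
      rw [List.range_succ, List.foldl_append]; rfl
    have hpair : (List.range m).foldl (pvStep s n) ([s], [("", words)])
        = (((List.range m).foldl (pvStep s n) ([s], [("", words)])).1,
           (pvPermsP m words).map (fun p => (PySem.Str.join "." p.1, p.2))) := by
      rw [← ih2 hm]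
    rw [hfold, hpair, pvStep_eval s words n m, ih1]
    have hfst : (pvPermsP (m+1) words).map (fun p => PySem.Str.join "." p.1 ++ s)
        = (PySem.List.permutations words (m+1)).map (fun c => PySem.Str.join "." c ++ s) := by
      rw [← pvPermsP_fst, List.map_map]; rfl
    constructor
    · rw [show List.range (m+1+1) = List.range (m+1) ++ [m+1] from List.range_succ,
        List.flatMap_append]
      simp [hfst]
    · intro hlt
      simp [hlt]

-- A's nested foldl as a flatMap
theorem pvA_flatMap (parts words : List String) :
    (List.range (parts.length + 1)).foldl (fun acc i =>
        (PySem.List.permutations words i).foldl (fun acc combo =>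
          acc ++ [PySem.Str.join "." combo ++ "." ++ PySem.Str.join "." parts]) acc) []
    = (List.range (parts.length + 1)).flatMap
        (fun i => (PySem.List.permutations words i).map
          (fun c => PySem.Str.join "." c ++ ("." ++ PySem.Str.join "." parts))) := by
  have hinner : ∀ (i : Nat) (acc : List String),
      (PySem.List.permutations words i).foldl (fun acc combo =>
        acc ++ [PySem.Str.join "." combo ++ "." ++ PySem.Str.join "." parts]) acc
      = acc ++ (PySem.List.permutations words i).map
          (fun c => PySem.Str.join "." c ++ ("." ++ PySem.Str.join "." parts)) := by
    intro i acc
    rw [PySem.List.foldl_append_singleton_eq_map]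
    simp [String.append_assoc]
  calc (List.range (parts.length + 1)).foldl (fun acc i =>
          (PySem.List.permutations words i).foldl (fun acc combo =>
            acc ++ [PySem.Str.join "." combo ++ "." ++ PySem.Str.join "." parts]) acc) []
      = (List.range (parts.length + 1)).foldl (fun acc i =>
          acc ++ (PySem.List.permutations words i).map
            (fun c => PySem.Str.join "." c ++ ("." ++ PySem.Str.join "." parts))) [] := by
        exact PySem.List.foldl_congr_mem _ _ _ _ (fun acc i _ => hinner i acc)
    _ = _ := by rw [PySem.List.foldl_append_eq_flatMap]; rfl

-- ===== VERDICT (by name: the statement is the Claim_ definition above) =====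
theorem generate_subdomain_permutations_spec : Claim_equal_generate_subdomain_permutations := by
  intro base_subdomain words _
  show generate_subdomain_permutations base_subdomain words
      = generate_subdomain_permutations_alt base_subdomain words
  simp only [generate_subdomain_permutations, generate_subdomain_permutations_alt]
  rw [pvA_flatMap,
    (pv_main ("." ++ PySem.Str.join "." ((PySem.Str.split? base_subdomain ".").getD []))
      words ((PySem.Str.split? base_subdomain ".").getD []).length
      ((PySem.Str.split? base_subdomain ".").getD []).length (Nat.le_refl _)).1]
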